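-- pv_equiv track=rewrite | github.com/kgwiazdak/ASD_and_WDI-exercises- | Exercises/Colors.py | colors
-- ===== SOURCE A (Python) =====
-- def colors(arr):
--     kolory = []
--     for el in arr:
--         if el not in kolory: kolory.append(el)
--     ile_kolorow = len(kolory)
--     k = []
--     c = [0 for _ in range(ile_kolorow)]
--     last = 0
--     for i in range(len(arr)):
--         if arr[i] not in k:
--             k.append(arr[i])
--         c[kolory.index(arr[i])]+=1
--         if arr[i] == arr[last]:
--             while c[kolory.index(arr[last])]>1:
--                 c[kolory.index(arr[last])]-=1
--                 last+=1
--         if len(k)==ile_kolorow:return last,i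
-- ===== SOURCE B (Python) =====
-- def colors(arr):
--     total = len(set(arr))
--     i = None
--     seen = set()
--     for idx, x in enumerate(arr):
--         seen.add(x)
--         if len(seen) == total:
--             i = idx
--             break
--     if i is None:        # only for empty arr
--         return None
--     seen = set()
--     for l in range(i, -1, -1):
--         seen.add(arr[l])
--         if len(seen) == total:
--             return (l, i)
-- ===== Notes on version B (the rewrite author's own statement) =====
-- stated objective: faster
-- what changed: Replaced A's single sliding-pointer scan with a per-color count array, list-based dedup and repeated kolory.index/`in` linear scans by two independent set-based passes: a forward pass finding the first index i at which every color has appeared, then a backward pass from i finding the maximal window start.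
import Mathlib
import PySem

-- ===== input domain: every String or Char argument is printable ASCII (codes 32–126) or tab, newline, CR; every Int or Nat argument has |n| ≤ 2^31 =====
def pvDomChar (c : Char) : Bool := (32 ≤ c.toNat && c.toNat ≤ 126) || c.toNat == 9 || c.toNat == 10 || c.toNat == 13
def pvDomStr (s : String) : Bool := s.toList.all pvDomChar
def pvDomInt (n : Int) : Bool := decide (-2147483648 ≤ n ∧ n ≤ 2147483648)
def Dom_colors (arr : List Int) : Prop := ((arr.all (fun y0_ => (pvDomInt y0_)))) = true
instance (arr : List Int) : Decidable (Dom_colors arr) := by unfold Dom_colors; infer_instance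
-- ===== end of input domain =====

-- B replaces A's sliding-pointer/count-array scan by two independent set-based passes
-- (forward to the first full-coverage index, backward to the maximal window start); return values agree everywhere.

-- ===== PORT A =====
-- the inner 'while c[kolory.index(arr[last])]>1' loop; fuel = len(arr) suffices since 'last'
-- strictly increases and stays below len(arr) (each step needs a window count > 1)
def colorsShrink (arr kolory c : List Int) (last : Nat) (fuel : Nat) : List Int × Nat :=
  match fuel with
  | 0 => (c, last)
  | Nat.succ fuel =>
    let j := (PySem.List.index? kolory (arr.getD last 0)).getD 0
    if 1 < c.getD j 0 then
      colorsShrink arr kolory (c.set j (c.getD j 0 - 1)) (last + 1) fuel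
    else (c, last)

-- the 'for i in range(len(arr))' loop with state (k, c, last)
def colorsLoop (arr kolory : List Int) (ile : Nat) (k c : List Int) (last i : Nat) :
    Option (Int × Int) :=
  if _h : i < arr.length then
    let x := arr.getD i 0
    let k' := if x ∈ k then k else k ++ [x]
    let j := (PySem.List.index? kolory x).getD 0
    let c1 := c.set j (c.getD j 0 + 1)
    let p := if x = arr.getD last 0 then colorsShrink arr kolory c1 last arr.length
             else (c1, last)
    if k'.length = ile then some ((p.2 : Int), (i : Int))
    else colorsLoop arr kolory ile k' p.1 p.2 (i + 1)
  else none
termination_by arr.length - i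

def colors (arr : List Int) : Option (Int × Int) :=
  let kolory := arr.foldl (fun ks el => if el ∈ ks then ks else ks ++ [el]) []
  let ile := kolory.length
  colorsLoop arr kolory ile [] (List.replicate ile (0 : Int)) 0 0

-- ===== PORT B =====
-- forward pass: first index at which 'seen' reaches all colors (none only when arr is empty)
def colorsFind (total : Nat) (seen : PySem.Set Int) (rest : List Int) (idx : Nat) : Option Nat :=
  match rest with
  | [] => none
  | x :: rs =>
    let seen' := PySem.Set.add seen x
    if seen'.length = total then some idx
    else colorsFind total seen' rs (idx + 1)

-- backward pass: 'for l in range(i, -1, -1)', first l (from above) whose window covers all colors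
def colorsBack (arr : List Int) (total : Nat) (seen : PySem.Set Int) (l i : Nat) :
    Option (Int × Int) :=
  let seen' := PySem.Set.add seen (arr.getD l 0)
  if seen'.length = total then some ((l : Int), (i : Int))
  else
    match l with
    | 0 => none
    | Nat.succ l' => colorsBack arr total seen' l' i

def colors_alt (arr : List Int) : Option (Int × Int) :=
  let total := (PySem.Set.ofList arr).length
  match colorsFind total PySem.Set.empty arr 0 with
  | none => none
  | some i => colorsBack arr total PySem.Set.empty i i

-- ===== PRECONDITION & SPEC =====
def Spec_colors (arr : List Int) (out : Option (Int × Int)) : Prop := out = colors_alt arr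
instance (arr : List Int) (out : Option (Int × Int)) : Decidable (Spec_colors arr out) := by
  unfold Spec_colors; infer_instance

-- ===== CLAIM (what is proved, stated in full; the proofs are below) =====
def Claim_equal_colors : Prop := ∀ (arr : List Int), Dom_colors arr → Spec_colors arr (colors arr)

-- ===== LEMMAS AND PROOFS =====

-- proof-layer definitions
def FullP (arr : List Int) (n : Nat) : Prop := ∀ x ∈ arr, x ∈ arr.take (n + 1)
def winh (arr : List Int) (l n : Nat) : List Int := (arr.take n).drop l
def CovP (arr : List Int) (n l : Nat) : Prop := ∀ x ∈ arr, x ∈ winh arr l (n + 1)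
def idxK (kol : List Int) (x : Int) : Nat := (PySem.List.index? kol x).getD 0
def RepC (arr c w : List Int) : Prop :=
  c.length = (PySem.Set.ofList arr).length ∧
  ∀ x ∈ arr, c.getD (idxK (PySem.Set.ofList arr) x) 0 = (w.count x : Int)

lemma winh_nil (arr : List Int) (l n : Nat) (h : n ≤ l) : winh arr l n = [] := by
  apply List.drop_eq_nil_of_le
  calc (arr.take n).length ≤ n := by simp
    _ ≤ l := h

lemma winh_cons (arr : List Int) (l n : Nat) (hl : l < n) (hn : n ≤ arr.length) :
    winh arr l n = arr.getD l 0 :: winh arr (l + 1) n := by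
  have hlen : (arr.take n).length = n := by simp [Nat.min_eq_left hn]
  have hl' : l < (arr.take n).length := by omega
  unfold winh
  rw [List.drop_eq_getElem_cons hl']
  congr 1
  rw [List.getElem_take]
  exact (List.getD_eq_getElem arr 0 (by omega)).symm

lemma winh_snoc (arr : List Int) (l n : Nat) (hl : l ≤ n) (hn : n < arr.length) :
    winh arr l (n + 1) = winh arr l n ++ [arr.getD n 0] := by
  unfold winh
  rw [List.take_succ_eq_append_getElem hn, List.drop_append_of_le_length (by simp; omega)]
  rw [List.getD_eq_getElem arr 0 hn]

lemma winh_subset (arr : List Int) (l n : Nat) : winh arr l n ⊆ arr :=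
  fun _ hx => List.take_subset _ _ (List.drop_subset _ _ hx)

lemma cov_antitone {arr : List Int} {n l l' : Nat} (h : l ≤ l') (hc : CovP arr n l') :
    CovP arr n l := by
  intro x hx
  have hmem := hc x hx
  have hsub : winh arr l' (n+1) ⊆ winh arr l (n+1) := by
    unfold winh
    have : (arr.take (n+1)).drop l' = ((arr.take (n+1)).drop l).drop (l' - l) := by
      rw [List.drop_drop]; congr 1; omega
    rw [this]; exact List.drop_subset _ _
  exact hsub hmem

lemma L_unique {arr : List Int} {n l m : Nat}
    (h1 : CovP arr n l) (h2 : ¬ CovP arr n (l + 1))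
    (h3 : CovP arr n m) (h4 : ¬ CovP arr n (m + 1)) : l = m := by
  rcases Nat.lt_trichotomy l m with h | h | h
  · exact absurd (cov_antitone (by omega) h3) h2
  · exact h
  · exact absurd (cov_antitone (by omega) h1) h4

lemma I_unique {arr : List Int} {n m : Nat}
    (h1 : FullP arr n) (h2 : ∀ j < n, ¬ FullP arr j)
    (h3 : FullP arr m) (h4 : ∀ j < m, ¬ FullP arr j) : n = m := by
  rcases Nat.lt_trichotomy n m with h | h | h
  · exact absurd h1 (h4 _ h)
  · exact h
  · exact absurd h3 (h2 _ h)

lemma card_full (arr s : List Int) (hnd : s.Nodup) (hsub : ∀ x ∈ s, x ∈ arr) :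
    (s.length = (PySem.Set.ofList arr).length ↔ ∀ x ∈ arr, x ∈ s) := by
  have h1 : s.toFinset.card = s.length := List.toFinset_card_of_nodup hnd
  have hnd2 : (PySem.Set.ofList arr).Nodup := PySem.Set.nodup_ofList arr
  have h2 : (PySem.Set.ofList arr).toFinset = arr.toFinset := by
    ext x; simp [PySem.Set.mem_ofList]
  have h3 : arr.toFinset.card = (PySem.Set.ofList arr).length := by
    rw [← h2]; exact List.toFinset_card_of_nodup hnd2
  have hsubF : s.toFinset ⊆ arr.toFinset := by
    intro x hx; simp only [List.mem_toFinset] at *; exact hsub x hx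
  constructor
  · intro hlen x hx
    have hcard : arr.toFinset.card ≤ s.toFinset.card := by omega
    have heq : s.toFinset = arr.toFinset := Finset.eq_of_subset_of_card_le hsubF hcard
    have : x ∈ s.toFinset := heq ▸ (List.mem_toFinset.mpr hx)
    exact List.mem_toFinset.mp this
  · intro hcov
    have heq : s.toFinset = arr.toFinset := by
      apply Finset.Subset.antisymm hsubF
      intro x hx
      exact List.mem_toFinset.mpr (hcov x (List.mem_toFinset.mp hx))
    calc s.length = s.toFinset.card := h1.symm
      _ = arr.toFinset.card := by rw [heq]
      _ = _ := h3

lemma len_iff_full (arr : List Int) (i : Nat) :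
    ((PySem.Set.ofList (arr.take (i+1))).length = (PySem.Set.ofList arr).length ↔ FullP arr i) := by
  rw [card_full arr _ (PySem.Set.nodup_ofList _)
    (fun x hx => List.take_subset _ _ ((PySem.Set.mem_ofList _ _).mp hx))]
  unfold FullP
  constructor
  · intro h x hx; exact (PySem.Set.mem_ofList _ _).mp (h x hx)
  · intro h x hx; exact (PySem.Set.mem_ofList _ _).mpr (h x hx)

lemma idxK_spec (arr : List Int) (x : Int) (hx : x ∈ arr) :
    ∃ h : idxK (PySem.Set.ofList arr) x < (PySem.Set.ofList arr).length,
      (PySem.Set.ofList arr)[idxK (PySem.Set.ofList arr) x]'h = x := by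
  have hxk : x ∈ PySem.Set.ofList arr := (PySem.Set.mem_ofList _ _).mpr hx
  obtain ⟨k, hk⟩ := Option.isSome_iff_exists.mp ((PySem.List.index?_isSome_iff _ _).mpr hxk)
  obtain ⟨hlt, hget, _⟩ := PySem.List.getElem_of_index?_eq_some hk
  have he : idxK (PySem.Set.ofList arr) x = k := by simp only [idxK, hk, Option.getD_some]
  subst he
  exact ⟨hlt, hget⟩

lemma idxK_inj (arr : List Int) (x y : Int) (hx : x ∈ arr) (hy : y ∈ arr)
    (h : idxK (PySem.Set.ofList arr) x = idxK (PySem.Set.ofList arr) y) : x = y := by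
  obtain ⟨h1, e1⟩ := idxK_spec arr x hx
  obtain ⟨h2, e2⟩ := idxK_spec arr y hy
  rw [← e1, ← e2]
  congr 1

lemma getD_set_self (c : List Int) (n : Nat) (v : Int) (h : n < c.length) :
    (c.set n v).getD n 0 = v := by
  simp [List.getD, h]

lemma getD_set_ne (c : List Int) (m n : Nat) (v : Int) (h : m ≠ n) :
    (c.set m v).getD n 0 = c.getD n 0 := by
  simp only [List.getD]
  rw [List.getElem?_set_ne h]

lemma RepC_inc (arr c w : List Int) (x : Int) (hx : x ∈ arr) (hr : RepC arr c w) :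
    RepC arr (c.set (idxK (PySem.Set.ofList arr) x) (c.getD (idxK (PySem.Set.ofList arr) x) 0 + 1))
      (w ++ [x]) := by
  obtain ⟨hlen, hcnt⟩ := hr
  obtain ⟨hlt, _⟩ := idxK_spec arr x hx
  refine ⟨by simp [hlen], fun y hy => ?_⟩
  by_cases hxy : idxK (PySem.Set.ofList arr) y = idxK (PySem.Set.ofList arr) x
  · have : y = x := idxK_inj arr y x hy hx hxy
    subst this
    rw [hxy, getD_set_self _ _ _ (by omega), hcnt y hy]
    simp [List.count_append]
  · rw [getD_set_ne _ _ _ _ (fun he => hxy he.symm), hcnt y hy]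
    have hne : y ≠ x := fun he => hxy (he ▸ rfl)
    simp [List.count_append, List.count_singleton]
    exact fun h => hne h.symm

lemma RepC_dec (arr c w' : List Int) (x : Int) (hx : x ∈ arr) (hr : RepC arr c (x :: w')) :
    RepC arr (c.set (idxK (PySem.Set.ofList arr) x) (c.getD (idxK (PySem.Set.ofList arr) x) 0 - 1))
      w' := by
  obtain ⟨hlen, hcnt⟩ := hr
  obtain ⟨hlt, _⟩ := idxK_spec arr x hx
  refine ⟨by simp [hlen], fun y hy => ?_⟩
  by_cases hxy : idxK (PySem.Set.ofList arr) y = idxK (PySem.Set.ofList arr) x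
  · have : y = x := idxK_inj arr y x hy hx hxy
    subst this
    rw [hxy, getD_set_self _ _ _ (by omega), hcnt y hy]
    simp
  · rw [getD_set_ne _ _ _ _ (fun he => hxy he.symm), hcnt y hy]
    have hne : y ≠ x := fun he => hxy (he ▸ rfl)
    simp [List.count_cons]
    exact fun h => hne h.symm

lemma fold_ofList (arr : List Int) :
    arr.foldl (fun ks el => if el ∈ ks then ks else ks ++ [el]) [] = PySem.Set.ofList arr := by
  rw [PySem.Set.ofList_eq_foldl]
  have : (PySem.Set.add : PySem.Set Int → Int → PySem.Set Int)
      = fun ks el => if el ∈ ks then ks else ks ++ [el] := by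
    funext s x; exact PySem.Set.add_eq_ite s x
  rw [this]


lemma shrink_spec (arr : List Int) (i : Nat) (hi : i < arr.length) :
    ∀ fuel last c, last ≤ i → i + 1 ≤ last + fuel →
    RepC arr c (winh arr last (i + 1)) →
    (∀ x ∈ arr.take (i + 1), x ∈ winh arr last (i + 1)) →
    ∃ c' last', colorsShrink arr (PySem.Set.ofList arr) c last fuel = (c', last') ∧
      last ≤ last' ∧ last' ≤ i ∧
      RepC arr c' (winh arr last' (i + 1)) ∧
      (∀ x ∈ arr.take (i + 1), x ∈ winh arr last' (i + 1)) ∧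
      (winh arr last' (i + 1)).count (arr.getD last' 0) = 1 := by
  intro fuel
  induction fuel with
  | zero => intro last c hlast hfuel _ _; omega
  | succ fuel ih =>
    intro last c hlast hfuel hrep hcov
    have hlastlt : last < arr.length := by omega
    set x0 := arr.getD last 0 with hx0
    have hx0mem : x0 ∈ arr := by
      rw [hx0, List.getD_eq_getElem arr 0 hlastlt]; exact List.getElem_mem _
    have hwin : winh arr last (i + 1) = x0 :: winh arr (last + 1) (i + 1) :=
      winh_cons arr last (i + 1) (by omega) (by omega)
    have hcount : c.getD (idxK (PySem.Set.ofList arr) x0) 0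
        = ((winh arr last (i + 1)).count x0 : Int) := hrep.2 x0 hx0mem
    by_cases htest : (1 : Int) < c.getD ((PySem.List.index? (PySem.Set.ofList arr) x0).getD 0) 0
    · -- body of the while loop runs
      have hcnt2 : 2 ≤ (winh arr last (i + 1)).count x0 := by
        have : (1 : Int) < ((winh arr last (i + 1)).count x0 : Int) := by
          rw [← hcount]; exact htest
        exact_mod_cast this
      have hlastlt_i : last < i := by
        by_contra hge
        have : last = i := by omega
        subst this
        have : winh arr last (last + 1) = [x0] := by
          rw [hwin, winh_nil arr (last+1) (last+1) (by omega)]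
        rw [this] at hcnt2
        simp at hcnt2
      have htail : 1 ≤ (winh arr (last + 1) (i + 1)).count x0 := by
        have h2' := hcnt2
        rw [hwin, List.count_cons] at h2'
        simp at h2'
        exact List.count_pos_iff.mpr h2'
      have hrep' : RepC arr (c.set (idxK (PySem.Set.ofList arr) x0)
          (c.getD (idxK (PySem.Set.ofList arr) x0) 0 - 1)) (winh arr (last + 1) (i + 1)) :=
        by rw [hwin] at hrep; exact RepC_dec arr c _ x0 hx0mem hrep
      have hcov' : ∀ x ∈ arr.take (i + 1), x ∈ winh arr (last + 1) (i + 1) := by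
        intro x hx
        have hxw := hcov x hx
        rw [hwin] at hxw
        rcases List.mem_cons.mp hxw with he | ht
        · subst he; exact List.count_pos_iff.mp (by omega)
        · exact ht
      obtain ⟨c', last', heq, h1, h2, h3, h4, h5⟩ :=
        ih (last + 1) _ (by omega) (by omega) hrep' hcov'
      refine ⟨c', last', ?_, by omega, h2, h3, h4, h5⟩
      rw [colorsShrink]
      simp only [← hx0]
      rw [if_pos htest]
      exact heq
    · -- loop exits
      have hle : (winh arr last (i + 1)).count x0 ≤ 1 := by
        have : ¬ (1 : Int) < ((winh arr last (i + 1)).count x0 : Int) := by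
          rw [← hcount]; exact htest
        exact_mod_cast not_lt.mp this
      have hge : 1 ≤ (winh arr last (i + 1)).count x0 := by
        apply List.count_pos_iff.mpr
        rw [hwin]; exact List.mem_cons_self
      refine ⟨c, last, ?_, le_refl _, hlast, hrep, hcov, by rw [← hx0]; omega⟩
      rw [colorsShrink]
      simp only [← hx0]
      rw [if_neg htest]

-- terminal case of the main loop: i = arr.length
lemma loop_terminal (arr : List Int) (hne : arr ≠ []) (hnone : ∀ n, n < arr.length → ¬ FullP arr n) : False := by
  have hfull : FullP arr (arr.length - 1) := by
    intro x hx
    have : arr.length - 1 + 1 = arr.length := by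
      cases arr with
      | nil => exact absurd rfl hne
      | cons a l => simp
    rw [this, List.take_length]
    exact hx
  have hlt : arr.length - 1 < arr.length := by
    cases arr with
    | nil => exact absurd rfl hne
    | cons a l => simp
  exact hnone _ hlt hfull

lemma loop_spec (arr : List Int) :
    ∀ d i k c last, arr.length - i ≤ d → i ≤ arr.length →
    k = PySem.Set.ofList (arr.take i) →
    RepC arr c (winh arr last i) →
    (∀ x ∈ arr.take i, x ∈ winh arr last i) →
    last ≤ i →
    (0 < i → last < i ∧ (winh arr last i).count (arr.getD last 0) = 1) →
    (∀ n, n < i → ¬ FullP arr n) →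
    (arr = [] ∧ colorsLoop arr (PySem.Set.ofList arr) (PySem.Set.ofList arr).length k c last i
        = none) ∨
    (∃ I L : Nat, colorsLoop arr (PySem.Set.ofList arr) (PySem.Set.ofList arr).length k c last i
        = some ((L : Int), (I : Int)) ∧
      FullP arr I ∧ (∀ n, n < I → ¬ FullP arr n) ∧ CovP arr I L ∧ ¬ CovP arr I (L + 1)) := by
  intro d
  induction d with
  | zero =>
    intro i k c last hd hile _ _ _ _ _ hnone
    have hieq : i = arr.length := by omega
    subst hieq
    have hend : colorsLoop arr (PySem.Set.ofList arr) (PySem.Set.ofList arr).length k c last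
        arr.length = none := by
      rw [colorsLoop]
      simp
    by_cases hnil : arr = []
    · exact Or.inl ⟨hnil, hend⟩
    · exact absurd (loop_terminal arr hnil hnone) id
  | succ d ih =>
    intro i k c last hd hile hk hrep hcov hlast hE3 hnone
    by_cases hilt : i < arr.length
    case neg =>
      have hieq : i = arr.length := by omega
      subst hieq
      have hend : colorsLoop arr (PySem.Set.ofList arr) (PySem.Set.ofList arr).length k c last
          arr.length = none := by
        rw [colorsLoop]
        simp
      by_cases hnil : arr = []
      · exact Or.inl ⟨hnil, hend⟩
      · exact absurd (loop_terminal arr hnil hnone) id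
    case pos =>
      set K := PySem.Set.ofList arr with hK
      set x := arr.getD i 0 with hx
      have hxmem : x ∈ arr := by
        rw [hx, List.getD_eq_getElem arr 0 hilt]; exact List.getElem_mem _
      have hxi : x = arr[i] := by rw [hx, List.getD_eq_getElem arr 0 hilt]
      set k' := if x ∈ k then k else k ++ [x] with hk'def
      set c1 := c.set (idxK K x) (c.getD (idxK K x) 0 + 1) with hc1
      set p := if x = arr.getD last 0 then colorsShrink arr K c1 last arr.length
               else (c1, last) with hp
      have hstep : colorsLoop arr K K.length k c last i =
          (if k'.length = K.length then some ((p.2 : Int), (i : Int))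
           else colorsLoop arr K K.length k' p.1 p.2 (i + 1)) := by
        have hidx : (PySem.List.index? K x).getD 0 = idxK K x := rfl
        rw [colorsLoop]
        simp only [dif_pos hilt, ← hx, ← hk'def, hidx, ← hc1, ← hp]
      -- k' is the dedup of the (i+1)-prefix
      have htk : arr.take (i + 1) = arr.take i ++ [x] := by
        rw [List.take_succ_eq_append_getElem hilt, hxi]
      have hk'' : k' = PySem.Set.ofList (arr.take (i + 1)) := by
        rw [hk'def, htk, PySem.Set.ofList_append_singleton, ← hk, PySem.Set.add_eq_ite]
      -- window extension
      have hwsnoc : winh arr last (i + 1) = winh arr last i ++ [x] := by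
        rw [winh_snoc arr last i hlast hilt, hx]
      have hrep1 : RepC arr c1 (winh arr last (i + 1)) := by
        rw [hwsnoc, hc1, hK]
        exact RepC_inc arr c _ x hxmem hrep
      have hcov1 : ∀ y ∈ arr.take (i + 1), y ∈ winh arr last (i + 1) := by
        intro y hy
        rw [htk] at hy
        rw [hwsnoc]
        rcases List.mem_append.mp hy with h | h
        · exact List.mem_append_left _ (hcov y h)
        · exact List.mem_append_right _ h
      -- the state after the (possible) shrink
      obtain ⟨c2, last2, hpval, hl2, hrep2, hcov2, hcnt2⟩ :
          ∃ c2 last2, p = (c2, last2) ∧ last2 ≤ i ∧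
            RepC arr c2 (winh arr last2 (i + 1)) ∧
            (∀ y ∈ arr.take (i + 1), y ∈ winh arr last2 (i + 1)) ∧
            (winh arr last2 (i + 1)).count (arr.getD last2 0) = 1 := by
        by_cases hbx : x = arr.getD last 0
        · obtain ⟨c', last', heq, _, h2, h3, h4, h5⟩ :=
            shrink_spec arr i hilt arr.length last c1 hlast (by omega) hrep1 hcov1
          refine ⟨c', last', ?_, h2, h3, h4, h5⟩
          rw [hp, if_pos hbx, hK]
          exact heq
        · have hipos : 0 < i := by
            rcases Nat.eq_zero_or_pos i with h0 | h0
            · exfalso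
              apply hbx
              have : last = 0 := by omega
              rw [this, hx, h0]
            · exact h0
          obtain ⟨hlti, hcnt1⟩ := hE3 hipos
          refine ⟨c1, last, ?_, by omega, hrep1, hcov1, ?_⟩
          · rw [hp, if_neg hbx]
          · have hne : (x == arr.getD last 0) = false := by
              simp only [beq_eq_false_iff_ne, ne_eq]
              exact hbx
            rw [hwsnoc, List.count_append, hcnt1, List.count_singleton, hne]
            simp
      have hlen_iff : (k'.length = K.length) ↔ FullP arr i := by
        rw [hk'', hK]
        exact len_iff_full arr i
      by_cases hfull : FullP arr i
      · -- Python returns (last2, i) here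
        apply Or.inr
        refine ⟨i, last2, ?_, hfull, hnone, ?_, ?_⟩
        · rw [hstep, if_pos (hlen_iff.mpr hfull), hpval]
        · intro y hy
          exact hcov2 y (hfull y hy)
        · intro hc
          have hl2mem : arr.getD last2 0 ∈ arr := by
            rw [List.getD_eq_getElem arr 0 (by omega)]; exact List.getElem_mem _
          have hmem := hc _ hl2mem
          have hwc : winh arr last2 (i + 1) = arr.getD last2 0 :: winh arr (last2 + 1) (i + 1) :=
            winh_cons arr last2 (i + 1) (by omega) (by omega)
          rw [hwc, List.count_cons] at hcnt2
          simp at hcnt2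
          rw [List.count_eq_zero] at hcnt2
          exact hcnt2 hmem
      · -- keep scanning
        have hnone' : ∀ n, n < i + 1 → ¬ FullP arr n := by
          intro n hn
          rcases Nat.lt_or_ge n i with h | h
          · exact hnone n h
          · have : n = i := by omega
            subst this
            exact hfull
        have := ih (i + 1) k' c2 last2 (by omega) (by omega) hk''
          hrep2 hcov2 (by omega) (fun _ => ⟨by omega, hcnt2⟩) hnone'
        rw [hstep, if_neg (fun h => hfull (hlen_iff.mp h)), hpval]
        exact this

lemma colors_char (arr : List Int) :
    (arr = [] ∧ colors arr = none) ∨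
    (∃ I L : Nat, colors arr = some ((L : Int), (I : Int)) ∧ FullP arr I ∧
      (∀ n, n < I → ¬ FullP arr n) ∧ CovP arr I L ∧ ¬ CovP arr I (L + 1)) := by
  have hrep0 : RepC arr (List.replicate (PySem.Set.ofList arr).length (0 : Int))
      (winh arr 0 0) := by
    constructor
    · simp
    · intro x _
      have : winh arr 0 0 = [] := winh_nil arr 0 0 (le_refl 0)
      rw [this]
      simp [List.getD, List.getElem?_replicate]
      split <;> simp
  have h := loop_spec arr arr.length 0 [] (List.replicate (PySem.Set.ofList arr).length 0) 0
    (by omega) (by omega) (by simp) hrep0 (by simp) (le_refl 0)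
    (fun h => absurd h (lt_irrefl 0)) (fun n hn => absurd hn (Nat.not_lt_zero n))
  have hc : colors arr = colorsLoop arr (PySem.Set.ofList arr) (PySem.Set.ofList arr).length []
      (List.replicate (PySem.Set.ofList arr).length 0) 0 0 := by
    simp only [colors, fold_ofList]
  rw [hc]
  exact h

lemma find_spec (arr : List Int) :
    ∀ rest idx seen, rest = arr.drop idx → seen = PySem.Set.ofList (arr.take idx) →
    (∀ n, n < idx → ¬ FullP arr n) →
    (arr = [] ∧ colorsFind (PySem.Set.ofList arr).length seen rest idx = none) ∨
    (∃ I, colorsFind (PySem.Set.ofList arr).length seen rest idx = some I ∧ I < arr.length ∧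
      FullP arr I ∧ (∀ n, n < I → ¬ FullP arr n)) := by
  intro rest
  induction rest with
  | nil =>
    intro idx seen hrest _ hnone
    have hlen : arr.length ≤ idx := List.drop_eq_nil_iff.mp hrest.symm
    have hend : colorsFind (PySem.Set.ofList arr).length seen [] idx = none := rfl
    by_cases hnil : arr = []
    · exact Or.inl ⟨hnil, hend⟩
    · exact absurd (loop_terminal arr hnil (fun n hn => hnone n (by omega))) id
  | cons x rs ihr =>
    intro idx seen hrest hseen hnone
    have hidx : idx < arr.length := by
      by_contra h
      rw [List.drop_eq_nil_of_le (by omega)] at hrest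
      exact List.cons_ne_nil _ _ hrest
    have hdrop := List.drop_eq_getElem_cons hidx
    rw [← hrest] at hdrop
    obtain ⟨hxval, hrs⟩ : x = arr[idx] ∧ rs = arr.drop (idx + 1) := by
      constructor <;> [exact (List.cons.injEq _ _ _ _ ▸ hdrop).1; exact (List.cons.injEq _ _ _ _ ▸ hdrop).2]
    have hseen' : PySem.Set.add seen x = PySem.Set.ofList (arr.take (idx + 1)) := by
      rw [List.take_succ_eq_append_getElem hidx, PySem.Set.ofList_append_singleton, ← hseen,
        ← hxval]
    have hstep : colorsFind (PySem.Set.ofList arr).length seen (x :: rs) idx =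
        (if (PySem.Set.add seen x).length = (PySem.Set.ofList arr).length then some idx
         else colorsFind (PySem.Set.ofList arr).length (PySem.Set.add seen x) rs (idx + 1)) := rfl
    have hiff : ((PySem.Set.add seen x).length = (PySem.Set.ofList arr).length) ↔ FullP arr idx := by
      rw [hseen']
      exact len_iff_full arr idx
    by_cases hfull : FullP arr idx
    · refine Or.inr ⟨idx, ?_, hidx, hfull, hnone⟩
      rw [hstep, if_pos (hiff.mpr hfull)]
    · have hnone' : ∀ n, n < idx + 1 → ¬ FullP arr n := by
        intro n hn
        rcases Nat.lt_or_ge n idx with h | h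
        · exact hnone n h
        · have : n = idx := by omega
          subst this
          exact hfull
      rw [hstep, if_neg (fun h => hfull (hiff.mp h))]
      exact ihr (idx + 1) (PySem.Set.add seen x) hrs hseen' hnone'

lemma back_spec (arr : List Int) (i : Nat) (hi : i < arr.length) :
    ∀ l, ∀ seen : PySem.Set Int, l ≤ i → seen.Nodup →
    (∀ x, x ∈ seen ↔ x ∈ winh arr (l + 1) (i + 1)) →
    (∃ l0, l0 ≤ l ∧ CovP arr i l0) →
    ∃ L : Nat, colorsBack arr (PySem.Set.ofList arr).length seen l i
        = some ((L : Int), (i : Int)) ∧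
      L ≤ l ∧ CovP arr i L ∧ (L = l ∨ ¬ CovP arr i (L + 1)) := by
  intro l
  induction l with
  | zero =>
    intro seen _ hnd hmem hex
    have hwc : winh arr 0 (i + 1) = arr.getD 0 0 :: winh arr 1 (i + 1) :=
      winh_cons arr 0 (i + 1) (by omega) (by omega)
    have hmem' : ∀ x, x ∈ PySem.Set.add seen (arr.getD 0 0) ↔ x ∈ winh arr 0 (i + 1) := by
      intro y
      rw [PySem.Set.mem_add, hwc, List.mem_cons, hmem]
      tauto
    have hcov0 : CovP arr i 0 := by
      obtain ⟨l0, hl0, hc⟩ := hex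
      have : l0 = 0 := by omega
      subst this
      exact hc
    have htest : (PySem.Set.add seen (arr.getD 0 0)).length = (PySem.Set.ofList arr).length := by
      rw [card_full arr _ (PySem.Set.nodup_add _ _ hnd)
        (fun y hy => winh_subset arr 0 (i + 1) ((hmem' y).mp hy))]
      intro y hy
      exact (hmem' y).mpr (hcov0 y hy)
    refine ⟨0, ?_, le_refl 0, hcov0, Or.inl rfl⟩
    rw [colorsBack]
    simp only [List.getD] at htest
    simp [htest]
  | succ l' ihl =>
    intro seen hl hnd hmem hex
    have hwc : winh arr (l' + 1) (i + 1) = arr.getD (l' + 1) 0 :: winh arr (l' + 2) (i + 1) :=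
      winh_cons arr (l' + 1) (i + 1) (by omega) (by omega)
    have hmem' : ∀ x, x ∈ PySem.Set.add seen (arr.getD (l' + 1) 0) ↔
        x ∈ winh arr (l' + 1) (i + 1) := by
      intro y
      rw [PySem.Set.mem_add, hwc, List.mem_cons, hmem]
      tauto
    have hnd' : (PySem.Set.add seen (arr.getD (l' + 1) 0)).Nodup := PySem.Set.nodup_add _ _ hnd
    have hiff : ((PySem.Set.add seen (arr.getD (l' + 1) 0)).length
        = (PySem.Set.ofList arr).length) ↔ CovP arr i (l' + 1) := by
      rw [card_full arr _ hnd'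
        (fun y hy => winh_subset arr (l' + 1) (i + 1) ((hmem' y).mp hy))]
      constructor
      · intro h y hy
        exact (hmem' y).mp (h y hy)
      · intro h y hy
        exact (hmem' y).mpr (h y hy)
    by_cases hcv : CovP arr i (l' + 1)
    · refine ⟨l' + 1, ?_, le_refl _, hcv, Or.inl rfl⟩
      rw [colorsBack]
      have h' := hiff.mpr hcv
      simp only [List.getD] at h'
      simp [h']
    · have hex' : ∃ l0, l0 ≤ l' ∧ CovP arr i l0 := by
        obtain ⟨l0, hl0, hc⟩ := hex
        refine ⟨l0, ?_, hc⟩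
        rcases Nat.lt_or_ge l0 (l' + 1) with h | h
        · omega
        · exfalso
          have : l0 = l' + 1 := by omega
          subst this
          exact hcv hc
      obtain ⟨L, hback, hLle, hcovL, hdisj⟩ := ihl (PySem.Set.add seen (arr.getD (l' + 1) 0))
        (by omega) hnd' (fun y => hmem' y) hex'
      refine ⟨L, ?_, by omega, hcovL, Or.inr ?_⟩
      · rw [colorsBack]
        simp only [if_neg (fun h => hcv (hiff.mp h))]
        exact hback
      · rcases hdisj with h | h
        · subst h
          exact hcv
        · exact h

lemma alt_char (arr : List Int) :
    (arr = [] ∧ colors_alt arr = none) ∨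
    (∃ I L : Nat, colors_alt arr = some ((L : Int), (I : Int)) ∧ FullP arr I ∧
      (∀ n, n < I → ¬ FullP arr n) ∧ CovP arr I L ∧ ¬ CovP arr I (L + 1)) := by
  rcases find_spec arr arr 0 PySem.Set.empty rfl rfl (fun n hn => absurd hn (Nat.not_lt_zero n))
    with ⟨hnil, hfind⟩ | ⟨I, hfind, hIlt, hfull, hleast⟩
  · refine Or.inl ⟨hnil, ?_⟩
    simp only [colors_alt, hfind]
  · have hcov0 : CovP arr I 0 := by
      intro y hy
      unfold winh
      rw [List.drop_zero]
      exact hfull y hy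
    obtain ⟨L, hback, hLle, hcovL, hdisj⟩ := back_spec arr I hIlt I PySem.Set.empty (le_refl I)
      List.nodup_nil
      (by
        intro y
        rw [winh_nil arr (I + 1) (I + 1) (le_refl _)]
        simp [PySem.Set.empty])
      ⟨0, Nat.zero_le I, hcov0⟩
    refine Or.inr ⟨I, L, ?_, hfull, hleast, hcovL, ?_⟩
    · simp only [colors_alt, hfind]
      exact hback
    · rcases hdisj with h | h
      · subst h
        intro hc
        have hne : arr ≠ [] := by
          intro h0
          rw [h0] at hIlt
          simp at hIlt
        obtain ⟨y, hy⟩ := List.exists_mem_of_ne_nil arr hne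
        have := hc y hy
        rw [winh_nil arr (L + 1) (L + 1) (le_refl _)] at this
        simp at this
      · exact h

lemma colors_nil : colors ([] : List Int) = none := by
  simp only [colors, fold_ofList]
  rw [colorsLoop]
  simp

lemma colors_alt_nil : colors_alt ([] : List Int) = none := rfl

-- ===== VERDICT (by name: the statement is the Claim_ definition above) =====
theorem colors_spec : Claim_equal_colors := by
  unfold Claim_equal_colors
  intro arr _
  unfold Spec_colors
  rcases colors_char arr with ⟨hnil, hA⟩ | ⟨I1, L1, hA, hf1, hl1, hc1, hn1⟩ <;>
    rcases alt_char arr with ⟨hnil2, hB⟩ | ⟨I2, L2, hB, hf2, hl2, hc2, hn2⟩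
  · rw [hA, hB]
  · subst hnil
    rw [colors_alt_nil] at hB
    exact absurd hB (by simp)
  · subst hnil2
    rw [colors_nil] at hA
    exact absurd hA (by simp)
  · have hI : I1 = I2 := I_unique hf1 hl1 hf2 hl2
    subst hI
    have hL : L1 = L2 := L_unique hc1 hn1 hc2 hn2
    subst hL
    rw [hA, hB]
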